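-- pv_equiv track=rewrite | github.com/python-discord/game-jam-2020 | charlie-experiments/grid_functions.py | compress_right
-- ===== SOURCE A (Python) =====
-- from typing import List
--
-- def compress_right(grid: List) -> bool:
--     """
--     Shift everything over to the right, compressing out any zeros.
--     2 0 2 0 -> 0 0 2 2
--     :param grid:
--     :return:
--     """
--     # Keep track if anything changed
--     changed = False
--
--     # Loop for each row
--     for row_no in range(len(grid)):
--
--         # Start at the right side and look for zeros
--         cur_col = len(grid) - 1
--         for _ in range(len(grid)):
--
--             # Is there a zero here?
--             if grid[row_no][cur_col] != 0:
--                 # No zero, look further left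
--                 cur_col -= 1
--             else:
--                 # Found a zero, shift cells to the right
--                 c = cur_col
--                 while c > 0:
--                     grid[row_no][c] = grid[row_no][c - 1]
--                     if grid[row_no][c]:
--                         changed = True
--                     c -= 1
--                 # Fill the left side in with a zero
--                 grid[row_no][0] = 0
--
--     # Return if anything changed
--     return changed
-- ===== SOURCE B (Python) =====
-- def compress_right(grid):
--     n = len(grid)
--     changed = False
--     for row in grid:
--         pref = [row[i] for i in range(n)]
--         nz = [v for v in pref if v != 0]
--         new = [0] * (n - len(nz)) + nz
--         if new != pref:
--             changed = True
--         row[:n] = new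
--     return changed
-- ===== Notes on version B (the rewrite author's own statement) =====
-- stated objective: alternative
-- what changed: A repeatedly scans each row from the right and shifts cells one-by-one whenever it sees a zero (n scan passes with O(n) shifts per row); B makes a single pass per row that collects the nonzero entries of the first n columns, left-pads them with zeros, writes the result back and sets the flag iff the row prefix changed.
import Mathlib
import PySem

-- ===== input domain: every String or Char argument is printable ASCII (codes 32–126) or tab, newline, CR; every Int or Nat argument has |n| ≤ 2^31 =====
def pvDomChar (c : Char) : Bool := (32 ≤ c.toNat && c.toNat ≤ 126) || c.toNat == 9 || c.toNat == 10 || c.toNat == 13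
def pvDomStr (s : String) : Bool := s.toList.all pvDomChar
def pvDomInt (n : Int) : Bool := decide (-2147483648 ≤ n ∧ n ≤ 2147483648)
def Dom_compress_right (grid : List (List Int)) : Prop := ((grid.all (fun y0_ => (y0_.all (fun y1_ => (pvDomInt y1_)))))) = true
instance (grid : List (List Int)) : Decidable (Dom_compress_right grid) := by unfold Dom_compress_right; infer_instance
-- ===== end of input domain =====

-- B replaces A's repeated right-scan-and-shift passes with a single per-row collect-nonzeros-and-left-pad pass.
-- Both A and B mutate the rows of `grid` in place to the same final state; the equivalence proved here is about the return value.

-- ===== PORT A =====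
-- the inner `while c > 0` shift loop: row[c] = row[c-1]; flag if the moved value is nonzero
def pvShift (row : List Int) (c : Nat) (changed : Bool) : List Int × Bool :=
  match c with
  | 0 => (row, changed)
  | Nat.succ c' =>
      let v := row.getD c' 0
      let row' := row.set (c' + 1) v
      let changed' := if v ≠ 0 then true else changed
      pvShift row' c' changed'

-- the inner `for _ in range(len(grid))` loop over one row; cur is cur_col
def pvInner (row : List Int) (cur : Int) (k : Nat) (changed : Bool) : List Int × Bool :=
  match k with
  | 0 => (row, changed)
  | Nat.succ k' =>
      if PySem.List.pyGetD row cur 0 ≠ 0 then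
        pvInner row (cur - 1) k' changed
      else
        let p := pvShift row cur.toNat changed
        pvInner (p.1.set 0 0) cur k' p.2

def compress_right (grid : List (List Int)) : Bool :=
  grid.foldl (fun ch row => (pvInner row ((grid.length : Int) - 1) grid.length ch).2) false

-- ===== PORT B =====
-- `new = [0] * (n - len(nz)) + nz` of Source B
def pvCompress (n : Nat) (pref : List Int) : List Int :=
  let nz := pref.filter (fun v => v ≠ 0)
  List.replicate (n - nz.length) 0 ++ nz

def compress_right_alt (grid : List (List Int)) : Bool :=
  let n := grid.length
  grid.foldl (fun ch row =>
    let pref := (PySem.List.pyRange 0 (n : Int) 1).map (fun i => PySem.List.pyGetD row i 0)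
    ch || decide (pvCompress n pref ≠ pref)) false

-- ===== PRECONDITION & SPEC =====
-- A indexes every row at columns 0 .. len(grid)-1; a row shorter than len(grid) raises IndexError.
def Pre_compress_right (grid : List (List Int)) : Prop :=
  ∀ row ∈ grid, grid.length ≤ row.length
instance (grid : List (List Int)) : Decidable (Pre_compress_right grid) := by
  unfold Pre_compress_right; infer_instance

def pvWitness_compress_right : List (List Int) := [[0, 1], [2, 0]]

def Spec_compress_right (grid : List (List Int)) (out : Bool) : Prop := out = compress_right_alt grid
instance (grid : List (List Int)) (out : Bool) : Decidable (Spec_compress_right grid out) := by unfold Spec_compress_right; infer_instance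

-- ===== CLAIM (what is proved, stated in full; the proofs are below) =====
def Claim_equal_compress_right : Prop := ∀ (grid : List (List Int)), Dom_compress_right grid → Pre_compress_right grid → Spec_compress_right grid (compress_right grid)

-- ===== LEMMAS AND PROOFS =====

-- number of nonzero entries of a window
def pvM (l : List Int) : Nat := (l.filter (fun v => v ≠ 0)).length
-- number of zeros strictly to the right of some nonzero entry
def pvZ (l : List Int) : Nat := ((l.dropWhile (fun v => v == 0)).filter (fun v => v == 0)).length

lemma pvM_zero_iff (l : List Int) : pvM l = 0 ↔ ∀ x ∈ l, x = 0 := by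
  simp [pvM, List.length_eq_zero_iff, List.filter_eq_nil_iff]

lemma pvM_append_singleton (l : List Int) (x : Int) :
    pvM (l ++ [x]) = pvM l + (if x ≠ 0 then 1 else 0) := by
  by_cases h : x = 0 <;> simp [pvM, List.filter_append, h]

lemma pvZ_cons_zero (l : List Int) : pvZ (0 :: l) = pvZ l := by
  simp [pvZ, List.dropWhile_cons]

lemma pvZ_append_singleton (l : List Int) (x : Int) :
    pvZ (l ++ [x]) =
      pvZ l + (if x = 0 ∧ ¬ (∀ y ∈ l, y = 0) then 1 else 0) := by
  have hz : (List.dropWhile (fun v : Int => v == 0) l).isEmpty = true ↔ ∀ y ∈ l, y = 0 := by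
    simp [List.isEmpty_iff, List.dropWhile_eq_nil_iff]
  rw [pvZ, List.dropWhile_append]
  by_cases hall : ∀ y ∈ l, y = 0
  · rw [if_pos (hz.mpr hall)]
    have hd : List.dropWhile (fun v : Int => v == 0) l = [] :=
      List.dropWhile_eq_nil_iff.mpr (by simpa using hall)
    by_cases h : x = 0 <;> simp [pvZ, h, hd] <;> exact hall
  · rw [if_neg (by simpa [hz] using hall)]
    by_cases h : x = 0 <;> simp [pvZ, List.filter_append, h, hall]

lemma pvM_add_pvZ_le (l : List Int) : pvM l + pvZ l ≤ l.length := by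
  have h2 : (l.filter (fun v : Int => v ≠ 0)).length
      + (l.filter (fun v : Int => v == 0)).length = l.length := by
    induction l with
    | nil => simp
    | cons a t ih => by_cases h : a = 0 <;> simp [h] at ih ⊢ <;> omega
  have h1 : pvZ l ≤ (l.filter (fun v : Int => v == 0)).length :=
    List.Sublist.length_le (List.Sublist.filter _ (List.dropWhile_sublist _))
  unfold pvM
  omega

lemma pvShift_spec (c : Nat) : ∀ (row : List Int) (ch : Bool), c < row.length →
    pvShift row c ch =
      (row.take 1 ++ row.take c ++ row.drop (c + 1),
        ch || decide (¬ ∀ y ∈ row.take c, y = 0)) := by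
  induction c with
  | zero =>
    intro row ch h
    simp [pvShift]
    conv_rhs => rw [← List.drop_one]
    exact (List.take_append_drop 1 row).symm
  | succ c ih =>
    intro row ch h
    have hc : c < row.length := by omega
    have hc1 : c + 1 < row.length := h
    rw [pvShift]
    rw [ih (row.set (c + 1) (row.getD c 0)) _ (by simpa using hc)]
    have ht1 : (row.set (c + 1) (row.getD c 0)).take 1 = row.take 1 := by
      rw [List.take_set, List.set_eq_of_length_le (by simp)]
    have htc : (row.set (c + 1) (row.getD c 0)).take c = row.take c := by
      rw [List.take_set, List.set_eq_of_length_le (by simp)]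
    have hd : (row.set (c + 1) (row.getD c 0)).drop (c + 1)
        = row.getD c 0 :: row.drop (c + 2) := by
      rw [List.drop_set, if_neg (by omega)]
      simp only [Nat.sub_self]
      rw [List.drop_eq_getElem_cons hc1, List.set_cons_zero,
        List.getD_eq_getElem _ _ hc]
    have hsucc : row.take (c + 1) = row.take c ++ [row.getD c 0] := by
      rw [List.take_succ, List.getElem?_eq_getElem hc, List.getD_eq_getElem _ _ hc]
      simp
    simp only [List.getD_eq_getElem?_getD] at ht1 htc hd hsucc ⊢
    refine Prod.ext ?_ ?_
    · rw [ht1, htc, hd, hsucc]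
      simp only [List.append_assoc, List.singleton_append, List.cons_append]
      rfl
    · simp only [htc, hsucc]
      by_cases hv : row[c]?.getD 0 = 0
      · by_cases hall : ∀ y ∈ List.take c row, y = 0
        · have e1 : ¬∃ x ∈ List.take c row, ¬x = 0 :=
            fun ⟨x, hx, hx0⟩ => hx0 (hall x hx)
          have e2 : ∀ y ∈ List.take c row ++ [row[c]?.getD 0], y = 0 := by
            intro y hy
            rcases List.mem_append.mp hy with hm | hm
            · exact hall y hm
            · rw [List.mem_singleton.mp hm]; exact hv
          simp [hv, e1, e2]
          intro x hx hx0
          rcases hx with hm | hm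
          · exact absurd (hall x hm) hx0
          · exact absurd hm hx0
        · have hex : ∃ y ∈ List.take c row, y ≠ 0 := by simpa using hall
          obtain ⟨y, hy, hy0⟩ := hex
          have e2 : ¬∀ y ∈ List.take c row ++ [row[c]?.getD 0], y = 0 :=
            fun hcon => hy0 (hcon y (List.mem_append_left _ hy))
          simp [hv, hall, e2]
          exact Or.inr ⟨y, Or.inl hy, hy0⟩
      · have e2 : ¬∀ y ∈ List.take c row ++ [row[c]?.getD 0], y = 0 :=
          fun hcon => hv (hcon _ (List.mem_append_right _ (List.mem_singleton_self _)))
        simp [hv, e2]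
        exact Or.inr ⟨row[c]?.getD 0, Or.inr rfl, hv⟩

lemma compressed_of_window_zero (row : List Int) (n w : Nat) (hw : w ≤ n)
    (hn : n ≤ row.length) (h0 : ∀ x ∈ row.take w, x = 0)
    (h2 : ∀ i : Nat, w ≤ i → i < n → row.getD i 0 ≠ 0) :
    pvCompress n (row.take n) = row.take n := by
  have hlen : (row.take n).length = n := by simp [hn]
  have htw : (row.take n).take w = List.replicate w 0 := by
    rw [List.take_take, min_eq_left hw, List.eq_replicate_iff]
    exact ⟨by simp; omega, h0⟩
  have hnz : ∀ x ∈ (row.take n).drop w, x ≠ 0 := by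
    intro x hx
    obtain ⟨j, hj, hx⟩ := List.mem_iff_getElem.mp hx
    have hjlt : w + j < n := by
      have := hj; simp [hlen] at this; omega
    have : x = row[w + j]'(by omega) := by
      rw [← hx, List.getElem_drop, List.getElem_take]
    rw [this, ← List.getD_eq_getElem row 0 (by omega)]
    exact h2 (w + j) (by omega) hjlt
  have f1 : (List.replicate w (0 : Int)).filter (fun v => v ≠ 0) = [] := by simp
  have f2 : ((row.take n).drop w).filter (fun v => v ≠ 0) = (row.take n).drop w :=
    List.filter_eq_self.mpr (fun a ha => by simpa using hnz a ha)
  have hfilter : (row.take n).filter (fun v => v ≠ 0) = (row.take n).drop w := by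
    conv_lhs => rw [← List.take_append_drop w (row.take n)]
    rw [List.filter_append, htw, f1, f2, List.nil_append]
  have hdlen : ((row.take n).drop w).length = n - w := by simp [hlen]
  simp only [pvCompress]
  rw [hfilter, hdlen]
  have hnw : n - (n - w) = w := by omega
  rw [hnw, ← htw, List.take_append_drop]

lemma ne_compress_of_inversion (n : Nat) (pref : List Int) (hlen : pref.length = n)
    (i j : Nat) (hij : i < j) (hj : j < n)
    (hi : pref.getD i 0 ≠ 0) (hjz : pref.getD j 0 = 0) :
    pvCompress n pref ≠ pref := by
  intro heq
  simp only [pvCompress] at heq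
  have hjn : j < pref.length := by omega
  have hin : i < pref.length := by omega
  by_cases hjlt : j < n - (pref.filter (fun v => v ≠ 0)).length
  · have hilt : i < n - (pref.filter (fun v => v ≠ 0)).length := by omega
    have h0 : pref[i]'hin = 0 := by
      have hrw : pref[i]'hin
          = (List.replicate (n - (pref.filter (fun v => v ≠ 0)).length) (0 : Int)
              ++ pref.filter (fun v => v ≠ 0))[i]'(by rw [heq]; exact hin) := by
        congr 1
        · exact heq.symm
      rw [hrw, List.getElem_append_left (by simpa using hilt)]
      simp
    exact hi (by rw [List.getD_eq_getElem _ _ hin, h0])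
  · have hmem : pref[j]'hjn ∈ pref.filter (fun v => v ≠ 0) := by
      have hrw : pref[j]'hjn
          = (List.replicate (n - (pref.filter (fun v => v ≠ 0)).length) (0 : Int)
              ++ pref.filter (fun v => v ≠ 0))[j]'(by rw [heq]; exact hjn) := by
        congr 1
        · exact heq.symm
      rw [hrw, List.getElem_append_right (by simpa using hjlt)]
      exact List.getElem_mem _
    have := List.of_mem_filter hmem
    rw [List.getD_eq_getElem _ _ hjn] at hjz
    simp [hjz] at this

lemma pvInner_spec (n : Nat) : ∀ (k : Nat) (row : List Int) (cur : Int) (ch : Bool),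
    n ≤ row.length → cur < (n : Int) → -1 ≤ cur →
    (∀ i : Nat, cur < (i : Int) → i < n → row.getD i 0 ≠ 0) →
    pvM (row.take (cur + 1).toNat) + pvZ (row.take (cur + 1).toNat) ≤ k →
    k ≤ (cur + 1).toNat + pvZ (row.take (cur + 1).toNat) →
    (pvInner row cur k ch).2 = (ch || decide (pvCompress n (row.take n) ≠ row.take n)) := by
  intro k
  induction k with
  | zero =>
    intro row cur ch hn hcn hc1 h2 hlow hup
    have hM : pvM (row.take (cur + 1).toNat) = 0 := by omega
    have h0 : ∀ x ∈ row.take (cur + 1).toNat, x = 0 := (pvM_zero_iff _).mp hM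
    have hcomp := compressed_of_window_zero row n (cur + 1).toNat (by omega) hn h0
      (fun i hi1 hi2 => h2 i (by omega) hi2)
    simp [pvInner, hcomp]
  | succ k ih =>
    intro row cur ch hn hcn hc1 h2 hlow hup
    have hcur0 : 0 ≤ cur := by
      by_contra hneg
      have hm1 : cur = -1 := by omega
      subst hm1
      simp [pvZ, pvM] at hlow hup
    have hceq : cur = (cur.toNat : Int) := by omega
    have hcc : (cur + 1).toNat = cur.toNat + 1 := by omega
    have hclt : cur.toNat < n := by omega
    have hcrow : cur.toNat < row.length := by omega
    have hget : PySem.List.pyGetD row cur 0 = row.getD cur.toNat 0 := by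
      conv_lhs => rw [hceq]
      rw [PySem.List.pyGetD_natCast]
    have hwin : row.take (cur.toNat + 1) = row.take cur.toNat ++ [row.getD cur.toNat 0] := by
      rw [List.take_succ, List.getElem?_eq_getElem hcrow, List.getD_eq_getElem _ _ hcrow]
      simp
    rw [pvInner, hget]
    by_cases hv : row.getD cur.toNat 0 = 0
    · -- zero found: shift branch
      rw [if_neg (by simpa using hv)]
      rw [pvShift_spec cur.toNat row ch hcrow]
      have hset : ((row.take 1 ++ row.take cur.toNat ++ row.drop (cur.toNat + 1)).set 0 0)
          = 0 :: (row.take cur.toNat ++ row.drop (cur.toNat + 1)) := by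
        cases row with
        | nil => simp at hcrow
        | cons a t => simp
      simp only [hset]
      set u := row.take cur.toNat with hu
      set r' := 0 :: (u ++ row.drop (cur.toNat + 1)) with hr'
      have hulen : u.length = cur.toNat := by simp [hu]; omega
      have hrlen : r'.length = row.length := by
        simp [hr', hulen]; omega
      have htake' : r'.take n = 0 :: (u ++ (row.drop (cur.toNat + 1)).take (n - (cur.toNat + 1))) := by
        have h1 : n = (n - 1) + 1 := by omega
        conv_lhs => rw [h1]
        rw [hr', List.take_succ_cons, List.take_append, List.take_of_length_le (by omega)]
        congr 3
        omega
      have htaken : row.take n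
          = (u ++ [row.getD cur.toNat 0]) ++ (row.drop (cur.toNat + 1)).take (n - (cur.toNat + 1)) := by
        rw [← hwin]
        have h1 : n = (cur.toNat + 1) + (n - (cur.toNat + 1)) := by omega
        conv_lhs => rw [h1]
        rw [List.take_add]
      have hfil : (r'.take n).filter (fun v => v ≠ 0) = (row.take n).filter (fun v => v ≠ 0) := by
        rw [htake', htaken, hv]
        simp [List.filter_append]
      have hcompeq : pvCompress n (r'.take n) = pvCompress n (row.take n) := by
        simp only [pvCompress, hfil]
      have hr'get : ∀ i : Nat, cur < (i : Int) → i < n → r'.getD i 0 ≠ 0 := by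
        intro i hi1 hi2
        have hige : cur.toNat + 1 ≤ i := by omega
        have hilen : i < r'.length := by omega
        have : r'.getD i 0 = row.getD i 0 := by
          rw [List.getD_eq_getElem?_getD, List.getD_eq_getElem?_getD, hr']
          have h1 : i = (i - 1) + 1 := by omega
          conv_lhs => rw [h1]
          rw [List.getElem?_cons_succ]
          rw [List.getElem?_append_right (by omega)]
          rw [List.getElem?_drop]
          congr 2
          omega
        rw [this]
        exact h2 i hi1 hi2
      have hn' : n ≤ r'.length := by omega
      -- budget bookkeeping
      have hMold : pvM (row.take (cur + 1).toNat) = pvM u := by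
        rw [hcc, hwin, pvM_append_singleton, hv]
        simp
      have hMnew : pvM (r'.take (cur + 1).toNat) = pvM u := by
        rw [hcc]
        have : r'.take (cur.toNat + 1) = 0 :: u.take cur.toNat := by
          rw [hr', List.take_succ_cons, List.take_append, List.take_of_length_le (by omega)]
          simp [hulen]
        rw [this, List.take_of_length_le (by omega)]
        simp [pvM, List.filter_cons]
      have hZnew : pvZ (r'.take (cur + 1).toNat) = pvZ u := by
        rw [hcc]
        have : r'.take (cur.toNat + 1) = 0 :: u.take cur.toNat := by
          rw [hr', List.take_succ_cons, List.take_append, List.take_of_length_le (by omega)]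
          simp [hulen]
        rw [this, List.take_of_length_le (by omega), pvZ_cons_zero]
      by_cases hall : ∀ y ∈ u, y = 0
      · -- no-op shift
        have hZold : pvZ (row.take (cur + 1).toNat) = pvZ u := by
          rw [hcc, hwin, pvZ_append_singleton]
          simp [hall]
          exact fun _ => hall
        have hZu : pvZ u = 0 := by
          have hd : List.dropWhile (fun v : Int => v == 0) u = [] :=
            List.dropWhile_eq_nil_iff.mpr (fun x hx => by simpa using hall x hx)
          simp [pvZ, hd]
        have hflag : (ch || decide (¬∀ y ∈ u, y = 0)) = ch := by
          simp [hall]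
          exact fun x hx hx0 => absurd (hall x hx) hx0
        have hMu : pvM u = 0 := (pvM_zero_iff u).mpr hall
        rw [hflag]
        rw [ih r' cur ch hn' hcn hc1 hr'get (by omega) (by omega)]
        have hsame : r'.take n = row.take n := by
          rw [htake', htaken, hv]
          have hrep : u = List.replicate cur.toNat 0 := by
            rw [List.eq_replicate_iff]
            exact ⟨by omega, hall⟩
          rw [hrep]
          have h00 : (0 : Int) :: List.replicate cur.toNat (0 : Int)
              = List.replicate cur.toNat (0 : Int) ++ [0] := by
            rw [← List.replicate_succ, List.replicate_succ']
          rw [← List.cons_append, h00, List.append_assoc]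
        rw [hsame]
      · -- real shift: the row was provably not compressed; both sides are true
        have hZold : pvZ (row.take (cur + 1).toNat) = pvZ u + 1 := by
          rw [hcc, hwin, pvZ_append_singleton]
          simp [hall]
          rw [← List.getD_eq_getElem?_getD]
          exact hv
        have hflag : (ch || decide (¬∀ y ∈ u, y = 0)) = true := by simp [hall]
        rw [hflag]
        rw [ih r' cur true hn' hcn hc1 hr'get (by omega) (by omega)]
        have hex : ∃ j : Nat, j < u.length ∧ u[j]?.getD 0 ≠ 0 := by
          have : ∃ y ∈ u, y ≠ 0 := by
            by_contra hno
            exact hall (fun y hy => not_not.mp (fun h0 => hno ⟨y, hy, h0⟩))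
          obtain ⟨y, hy, hy0⟩ := this
          obtain ⟨j, hj, rfl⟩ := List.mem_iff_getElem.mp hy
          exact ⟨j, hj, by rw [List.getElem?_eq_getElem hj]; simpa using hy0⟩
        obtain ⟨j, hjlt, hjnz⟩ := hex
        have hne : pvCompress n (row.take n) ≠ row.take n := by
          refine ne_compress_of_inversion n (row.take n) (by simp; omega) j cur.toNat
            (by omega) hclt ?_ ?_
          · have hjc : j < cur.toNat := by omega
            have hh1 : (row.take n).getD j 0 = row.getD j 0 := by
              rw [List.getD_eq_getElem _ _ (by simp; omega),
                  List.getD_eq_getElem _ _ (by omega)]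
              simp [List.getElem_take]
            have hh2 : u.getD j 0 = row.getD j 0 := by
              rw [hu, List.getD_eq_getElem _ _ (by simp; omega),
                  List.getD_eq_getElem _ _ (by omega)]
              simp [List.getElem_take]
            rw [hh1, ← hh2]
            rwa [List.getD_eq_getElem?_getD]
          · rw [List.getD_eq_getElem _ _ (by simp; omega)]
            rw [List.getElem_take]
            rw [← List.getD_eq_getElem _ _ hcrow]
            exact hv
        simp [hne]
    · -- nonzero: move left
      rw [if_pos hv]
      have h2' : ∀ i : Nat, cur - 1 < (i : Int) → i < n → row.getD i 0 ≠ 0 := by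
        intro i hi1 hi2
        by_cases hic : i = cur.toNat
        · subst hic; exact hv
        · exact h2 i (by omega) hi2
      have hMold : pvM (row.take (cur + 1).toNat) = pvM (row.take cur.toNat) + 1 := by
        rw [hcc, hwin, pvM_append_singleton]
        simp [hv]
        intro h0
        apply hv
        rw [List.getD_eq_getElem?_getD]
        exact h0
      have hZold : pvZ (row.take (cur + 1).toNat) = pvZ (row.take cur.toNat) := by
        rw [hcc, hwin, pvZ_append_singleton]
        simp [hv]
        exact fun h0 => absurd h0 hv
      have hcm : (cur - 1 + 1).toNat = cur.toNat := by omega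
      rw [ih row (cur - 1) ch hn (by omega) (by omega) h2'
        (by rw [hcm]; omega) (by rw [hcm]; omega)]

lemma row_step (n : Nat) (row : List Int) (h : n ≤ row.length) (ch : Bool) :
    (pvInner row ((n : Int) - 1) n ch).2 = (ch || decide (pvCompress n (row.take n) ≠ row.take n)) := by
  have hcur : ((n : Int) - 1 + 1).toNat = n := by omega
  have hle := pvM_add_pvZ_le (row.take n)
  have hlen : (row.take n).length = n := by simp [h]
  refine pvInner_spec n n row ((n : Int) - 1) ch h (by omega) (by omega)
    (fun i h1 h2 => absurd h2 (by omega)) ?_ ?_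
  · rw [hcur]; omega
  · rw [hcur]; exact Nat.le_add_right _ _

-- `pref = [row[i] for i in range(n)]` equals the first n entries when the row is long enough
lemma map_range_take (row : List Int) (n : Nat) (h : n ≤ row.length) :
    (PySem.List.pyRange 0 (n : Int) 1).map (fun i => PySem.List.pyGetD row i 0) = row.take n := by
  induction n with
  | zero => simp [PySem.List.pyRange_one_eq_nil]
  | succ m ih =>
    have hcast : ((m + 1 : Nat) : Int) = (m : Int) + 1 := by push_cast; ring
    rw [hcast, PySem.List.pyRange_one_succ_right (by positivity)]
    rw [List.map_append, ih (by omega)]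
    have hm : m < row.length := by omega
    have hg : PySem.List.pyGetD row ((m : Nat) : Int) 0 = row[m] := by
      rw [PySem.List.pyGetD_natCast, List.getD_eq_getElem _ _ hm]
    simp only [List.map_cons, List.map_nil, hg]
    rw [List.take_succ, List.getElem?_eq_getElem hm]
    simp

-- ===== VERDICT (by name: the statement is the Claim_ definition above) =====
theorem compress_right_spec : Claim_equal_compress_right := by
  intro grid _ hpre
  unfold Spec_compress_right compress_right compress_right_alt
  show _ = List.foldl (fun ch row =>
    ch || decide (pvCompress grid.length
        ((PySem.List.pyRange 0 (grid.length : Int) 1).map (fun i => PySem.List.pyGetD row i 0))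
      ≠ (PySem.List.pyRange 0 (grid.length : Int) 1).map (fun i => PySem.List.pyGetD row i 0))) false grid
  refine PySem.List.foldl_congr_mem _ _ _ _ ?_
  intro ch row hrow
  rw [map_range_take row grid.length (hpre row hrow)]
  simpa using row_step grid.length row (hpre row hrow) ch
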